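-- pv_equiv track=rewrite | github.com/Lyx3314844-03/superspider | pyspider/antibot/friction.py | _recommended_actions
-- ===== SOURCE A (Python) =====
-- from typing import Dict, Iterable, List, Mapping, Optional
--
-- def _dedupe(items: Iterable[str]) -> List[str]:
--     seen = set()
--     out: List[str] = []
--     for item in items:
--         if item not in seen:
--             seen.add(item)
--             out.append(item)
--     return out
--
-- def _recommended_actions(signals: List[str], retry_after: Optional[int]) -> List[str]:
--     actions: List[str] = []
--     if retry_after is not None or "rate-limited" in signals:
--         actions.extend(["honor-retry-after", "reduce-concurrency", "increase-crawl-delay"])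
--     if any(signal in signals for signal in ("managed-browser-challenge", "waf-vendor", "empty-or-script-shell")):
--         actions.extend(["render-with-browser", "persist-session-state", "capture-html-screenshot-har"])
--     if any(signal in signals for signal in ("js-signature", "fingerprint-required")):
--         actions.extend(["capture-devtools-network", "run-nodejs-reverse-analysis", "replay-authorized-session-only"])
--     if any(signal in signals for signal in ("captcha", "slider-captcha", "auth-required")):
--         actions.extend(["pause-for-human-access", "document-authorization-requirement"])
--     if "request-blocked" in signals:
--         actions.append("stop-or-seek-site-permission")
--     actions.append("respect-robots-and-terms")
--     return _dedupe(actions)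
-- ===== SOURCE B (Python) =====
-- from typing import List, Optional
--
-- # Inverted index: signal -> index of the rule it fires.
-- _RULE_OF_SIGNAL = {
--     "rate-limited": 0,
--     "managed-browser-challenge": 1, "waf-vendor": 1, "empty-or-script-shell": 1,
--     "js-signature": 2, "fingerprint-required": 2,
--     "captcha": 3, "slider-captcha": 3, "auth-required": 3,
--     "request-blocked": 4,
-- }
--
-- _RULE_ACTIONS = [
--     ["honor-retry-after", "reduce-concurrency", "increase-crawl-delay"],
--     ["render-with-browser", "persist-session-state", "capture-html-screenshot-har"],
--     ["capture-devtools-network", "run-nodejs-reverse-analysis", "replay-authorized-session-only"],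
--     ["pause-for-human-access", "document-authorization-requirement"],
--     ["stop-or-seek-site-permission"],
-- ]
--
-- def _recommended_actions(signals: List[str], retry_after: Optional[int]) -> List[str]:
--     # One pass over the input: classify each signal via the inverted index,
--     # collecting the set of fired rule indices; then emit the actions of the
--     # fired rules in rule order.
--     fired = set()
--     if retry_after is not None:
--         fired.add(0)  # a Retry-After header fires the rate-limit rule
--     for s in signals:
--         i = _RULE_OF_SIGNAL.get(s)
--         if i is not None:
--             fired.add(i)
--     out: List[str] = []
--     for i, acts in enumerate(_RULE_ACTIONS):
--         if i in fired:
--             out.extend(acts)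
--     out.append("respect-robots-and-terms")
--     return out
-- ===== Notes on version B (the rewrite author's own statement) =====
-- stated objective: alternative
-- what changed: Instead of testing each rule's trigger list against the signals (a membership scan of signals per trigger), B makes one pass over the signals classifying each through an inverted signal->rule-index dict into a set of fired rule indices (retry_after pre-fires rule 0), then emits the actions of the fired rules in rule order; the no-op _dedupe is dropped.
import Mathlib
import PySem

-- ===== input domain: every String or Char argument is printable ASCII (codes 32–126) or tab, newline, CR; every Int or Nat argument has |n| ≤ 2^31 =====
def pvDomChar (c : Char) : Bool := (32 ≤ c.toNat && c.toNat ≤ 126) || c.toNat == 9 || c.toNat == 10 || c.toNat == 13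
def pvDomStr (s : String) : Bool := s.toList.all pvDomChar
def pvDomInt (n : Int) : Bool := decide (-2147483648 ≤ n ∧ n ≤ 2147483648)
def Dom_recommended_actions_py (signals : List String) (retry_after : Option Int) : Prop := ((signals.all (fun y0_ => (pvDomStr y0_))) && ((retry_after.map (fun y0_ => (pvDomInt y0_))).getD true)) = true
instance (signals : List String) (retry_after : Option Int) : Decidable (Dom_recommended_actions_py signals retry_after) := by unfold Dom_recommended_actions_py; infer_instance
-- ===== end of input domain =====

-- B replaces A's per-rule trigger scans by one classifying pass over the signals through an inverted signal→rule-index map into a set of fired rule indices, then emits actions per fired rule; the (no-op) dedupe is dropped; objective: alternative.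


-- ===== PORT A =====
-- _dedupe: seen-set plus output list, one fold over the items (literal port)
def pvDedupe (items : List String) : List String :=
  (items.foldl
    (fun (st : PySem.Set String × List String) item =>
      if item ∈ st.1 then st
      else (PySem.Set.add st.1 item, st.2 ++ [item]))
    (PySem.Set.empty, [])).2

def recommended_actions_py (signals : List String) (retry_after : Option Int) : List String :=
  let actions : List String := []
  let actions := if retry_after ≠ none ∨ "rate-limited" ∈ signals then
      actions ++ ["honor-retry-after", "reduce-concurrency", "increase-crawl-delay"] else actions
  let actions := if ["managed-browser-challenge", "waf-vendor", "empty-or-script-shell"].any (fun s => decide (s ∈ signals)) then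
      actions ++ ["render-with-browser", "persist-session-state", "capture-html-screenshot-har"] else actions
  let actions := if ["js-signature", "fingerprint-required"].any (fun s => decide (s ∈ signals)) then
      actions ++ ["capture-devtools-network", "run-nodejs-reverse-analysis", "replay-authorized-session-only"] else actions
  let actions := if ["captcha", "slider-captcha", "auth-required"].any (fun s => decide (s ∈ signals)) then
      actions ++ ["pause-for-human-access", "document-authorization-requirement"] else actions
  let actions := if "request-blocked" ∈ signals then
      actions ++ ["stop-or-seek-site-permission"] else actions
  pvDedupe (actions ++ ["respect-robots-and-terms"])

-- ===== PORT B =====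
-- B's inverted index: signal -> index of the rule it fires (a literal dict)
def pvRuleOfSignal : PySem.Dict String Int := PySem.Dict.mk
  [ ("rate-limited", 0),
    ("managed-browser-challenge", 1), ("waf-vendor", 1), ("empty-or-script-shell", 1),
    ("js-signature", 2), ("fingerprint-required", 2),
    ("captcha", 3), ("slider-captcha", 3), ("auth-required", 3),
    ("request-blocked", 4) ]

def pvRuleActions : List (List String) :=
  [ ["honor-retry-after", "reduce-concurrency", "increase-crawl-delay"],
    ["render-with-browser", "persist-session-state", "capture-html-screenshot-har"],
    ["capture-devtools-network", "run-nodejs-reverse-analysis", "replay-authorized-session-only"],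
    ["pause-for-human-access", "document-authorization-requirement"],
    ["stop-or-seek-site-permission"] ]

def recommended_actions_py_alt (signals : List String) (retry_after : Option Int) : List String :=
  let fired : PySem.Set Int := PySem.Set.empty
  let fired := if retry_after ≠ none then PySem.Set.add fired 0 else fired
  let fired := signals.foldl
    (fun f s => match PySem.Dict.get? pvRuleOfSignal s with
      | some i => PySem.Set.add f i
      | none => f) fired
  let out := (PySem.List.enumerate pvRuleActions).foldl
    (fun out p => if p.1 ∈ fired then out ++ p.2 else out) []
  out ++ ["respect-robots-and-terms"]

-- ===== PRECONDITION & SPEC =====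
def Spec_recommended_actions_py (signals : List String) (retry_after : Option Int) (out : List String) : Prop := out = recommended_actions_py_alt signals retry_after
instance (signals : List String) (retry_after : Option Int) (out : List String) : Decidable (Spec_recommended_actions_py signals retry_after out) := by unfold Spec_recommended_actions_py; infer_instance

-- ===== CLAIM (what is proved, stated in full; the proofs are below) =====
def Claim_equal_recommended_actions_py : Prop := ∀ (signals : List String) (retry_after : Option Int), Dom_recommended_actions_py signals retry_after → Spec_recommended_actions_py signals retry_after (recommended_actions_py signals retry_after)

-- ===== LEMMAS AND PROOFS =====
-- `if c then acc ++ a else acc` as an append of a conditional block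
theorem pv_ite_append (c : Prop) [Decidable c] (acc a : List String) :
    (if c then acc ++ a else acc) = acc ++ (if c then a else []) := by
  split <;> simp

-- equal conditions give equal conditional blocks
theorem pv_block_eq {c1 c2 : Prop} [Decidable c1] [Decidable c2] (h : c1 ↔ c2) (a : List String) :
    (if c1 then a else []) = (if c2 then a else []) := by
  split_ifs with h1 h2 <;> first | rfl | exact absurd (h.1 h1) h2 | exact absurd (h.2 ‹c2›) h1

-- membership in B's fired set after the classifying pass over the signals
theorem pv_mem_fired (signals : List String) (f0 : PySem.Set Int) (i : Int) :
    i ∈ signals.foldl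
      (fun f s => match PySem.Dict.get? pvRuleOfSignal s with
        | some j => PySem.Set.add f j
        | none => f) f0 ↔
    i ∈ f0 ∨ ∃ s ∈ signals, PySem.Dict.get? pvRuleOfSignal s = some i := by
  induction signals generalizing f0 with
  | nil => simp
  | cons x xs ih =>
    rw [List.foldl_cons]
    cases hx : PySem.Dict.get? pvRuleOfSignal x
    · simp_all
    · simp_all [PySem.Set.mem_add]
      tauto

-- the inverted index hits value i exactly on rule i's trigger signals
theorem pv_lookup_eq (s : String) (i : Int) :
    PySem.Dict.get? pvRuleOfSignal s = some i ↔
    ((s = "rate-limited" ∧ i = 0) ∨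
     ((s = "managed-browser-challenge" ∨ s = "waf-vendor" ∨ s = "empty-or-script-shell") ∧ i = 1) ∨
     ((s = "js-signature" ∨ s = "fingerprint-required") ∧ i = 2) ∨
     ((s = "captcha" ∨ s = "slider-captcha" ∨ s = "auth-required") ∧ i = 3) ∨
     (s = "request-blocked" ∧ i = 4)) := by
  simp only [pvRuleOfSignal, PySem.Dict.get?_mk_cons, beq_iff_eq]
  split_ifs with h1 h2 h3 h4 h5 h6 h7 h8 h9 h10 <;>
    simp_all [PySem.Dict.get?, eq_comm]

-- rule i fires iff some signal triggers it (plus retry_after for rule 0)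
theorem pv_fired_iff (signals : List String) (retry_after : Option Int) (i : Int) :
    (i ∈ signals.foldl
      (fun f s => match PySem.Dict.get? pvRuleOfSignal s with
        | some j => PySem.Set.add f j
        | none => f)
      (if retry_after ≠ none then PySem.Set.add PySem.Set.empty 0 else PySem.Set.empty)) ↔
    ((retry_after ≠ none ∧ i = 0) ∨ ∃ s ∈ signals, PySem.Dict.get? pvRuleOfSignal s = some i) := by
  rw [pv_mem_fired]
  constructor
  · rintro (h | h)
    · left
      by_cases hr : retry_after = none <;> simp_all [PySem.Set.empty]
    · exact Or.inr h
  · rintro (⟨h, rfl⟩ | h)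
    · left; simp [h, PySem.Set.empty]
    · exact Or.inr h

-- the five trigger conditions, A's form vs B's fired-set form
theorem pv_c0 (signals : List String) (retry_after : Option Int) :
    (retry_after ≠ none ∨ "rate-limited" ∈ signals) ↔
    ((0:Int) ∈ signals.foldl
      (fun f s => match PySem.Dict.get? pvRuleOfSignal s with
        | some j => PySem.Set.add f j
        | none => f)
      (if retry_after ≠ none then PySem.Set.add PySem.Set.empty 0 else PySem.Set.empty)) := by
  rw [pv_fired_iff]
  constructor
  · rintro (hr | hm)
    · exact Or.inl ⟨hr, rfl⟩
    · exact Or.inr ⟨_, hm, (pv_lookup_eq _ 0).2 (Or.inl ⟨rfl, rfl⟩)⟩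
  · rintro (⟨hr, _⟩ | ⟨s, hs, hl⟩)
    · exact Or.inl hr
    · right
      rcases (pv_lookup_eq s 0).1 hl with ⟨rfl, _⟩ | ⟨_, h⟩ | ⟨_, h⟩ | ⟨_, h⟩ | ⟨_, h⟩ <;>
        first | exact hs | omega

theorem pv_c1 (signals : List String) (retry_after : Option Int) :
    (["managed-browser-challenge", "waf-vendor", "empty-or-script-shell"].any (fun s => decide (s ∈ signals)) = true) ↔
    ((1:Int) ∈ signals.foldl
      (fun f s => match PySem.Dict.get? pvRuleOfSignal s with
        | some j => PySem.Set.add f j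
        | none => f)
      (if retry_after ≠ none then PySem.Set.add PySem.Set.empty 0 else PySem.Set.empty)) := by
  rw [pv_fired_iff, List.any_eq_true]
  constructor
  · rintro ⟨t, ht, ht'⟩
    refine Or.inr ⟨t, by simpa using ht', (pv_lookup_eq t 1).2 ?_⟩
    fin_cases ht <;> simp_all
  · rintro (⟨_, h⟩ | ⟨s, hs, hl⟩)
    · omega
    · rcases (pv_lookup_eq s 1).1 hl with ⟨_, h⟩ | ⟨h, _⟩ | ⟨_, h⟩ | ⟨_, h⟩ | ⟨_, h⟩
      · omega
      · exact ⟨s, by rcases h with rfl | rfl | rfl <;> simp, by simpa using hs⟩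
      · omega
      · omega
      · omega

theorem pv_c2 (signals : List String) (retry_after : Option Int) :
    (["js-signature", "fingerprint-required"].any (fun s => decide (s ∈ signals)) = true) ↔
    ((2:Int) ∈ signals.foldl
      (fun f s => match PySem.Dict.get? pvRuleOfSignal s with
        | some j => PySem.Set.add f j
        | none => f)
      (if retry_after ≠ none then PySem.Set.add PySem.Set.empty 0 else PySem.Set.empty)) := by
  rw [pv_fired_iff, List.any_eq_true]
  constructor
  · rintro ⟨t, ht, ht'⟩
    refine Or.inr ⟨t, by simpa using ht', (pv_lookup_eq t 2).2 ?_⟩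
    fin_cases ht <;> simp_all
  · rintro (⟨_, h⟩ | ⟨s, hs, hl⟩)
    · omega
    · rcases (pv_lookup_eq s 2).1 hl with ⟨_, h⟩ | ⟨_, h⟩ | ⟨h, _⟩ | ⟨_, h⟩ | ⟨_, h⟩
      · omega
      · omega
      · exact ⟨s, by rcases h with rfl | rfl <;> simp, by simpa using hs⟩
      · omega
      · omega

theorem pv_c3 (signals : List String) (retry_after : Option Int) :
    (["captcha", "slider-captcha", "auth-required"].any (fun s => decide (s ∈ signals)) = true) ↔
    ((3:Int) ∈ signals.foldl
      (fun f s => match PySem.Dict.get? pvRuleOfSignal s with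
        | some j => PySem.Set.add f j
        | none => f)
      (if retry_after ≠ none then PySem.Set.add PySem.Set.empty 0 else PySem.Set.empty)) := by
  rw [pv_fired_iff, List.any_eq_true]
  constructor
  · rintro ⟨t, ht, ht'⟩
    refine Or.inr ⟨t, by simpa using ht', (pv_lookup_eq t 3).2 ?_⟩
    fin_cases ht <;> simp_all
  · rintro (⟨_, h⟩ | ⟨s, hs, hl⟩)
    · omega
    · rcases (pv_lookup_eq s 3).1 hl with ⟨_, h⟩ | ⟨_, h⟩ | ⟨_, h⟩ | ⟨h, _⟩ | ⟨_, h⟩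
      · omega
      · omega
      · omega
      · exact ⟨s, by rcases h with rfl | rfl | rfl <;> simp, by simpa using hs⟩
      · omega

theorem pv_c4 (signals : List String) (retry_after : Option Int) :
    ("request-blocked" ∈ signals) ↔
    ((4:Int) ∈ signals.foldl
      (fun f s => match PySem.Dict.get? pvRuleOfSignal s with
        | some j => PySem.Set.add f j
        | none => f)
      (if retry_after ≠ none then PySem.Set.add PySem.Set.empty 0 else PySem.Set.empty)) := by
  rw [pv_fired_iff]
  constructor
  · intro hm
    exact Or.inr ⟨_, hm, (pv_lookup_eq _ 4).2 (Or.inr (Or.inr (Or.inr (Or.inr ⟨rfl, rfl⟩))))⟩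
  · rintro (⟨_, h⟩ | ⟨s, hs, hl⟩)
    · omega
    · rcases (pv_lookup_eq s 4).1 hl with ⟨_, h⟩ | ⟨_, h⟩ | ⟨_, h⟩ | ⟨_, h⟩ | ⟨rfl, _⟩ <;>
        first | exact hs | omega

-- dedupe is the identity on duplicate-free lists
theorem pv_dedupe_aux (items : List String) (seen : PySem.Set String) (out : List String)
    (hn : items.Nodup) (hd : ∀ x ∈ items, x ∉ seen) :
    (items.foldl
      (fun (st : PySem.Set String × List String) item =>
        if item ∈ st.1 then st
        else (PySem.Set.add st.1 item, st.2 ++ [item]))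
      (seen, out)).2 = out ++ items := by
  induction items generalizing seen out with
  | nil => simp
  | cons x xs ih =>
    have hx : x ∉ seen := hd x (by simp)
    rw [List.foldl_cons, if_neg hx]
    rw [ih (PySem.Set.add seen x) (out ++ [x]) (List.Nodup.of_cons hn)
      (fun y hy => by
        rw [PySem.Set.mem_add]
        rintro (h | rfl)
        · exact hd y (by simp [hy]) h
        · exact (List.nodup_cons.1 hn).1 hy)]
    simp

theorem pv_dedupe_of_nodup (l : List String) (h : l.Nodup) : pvDedupe l = l := by
  unfold pvDedupe
  rw [pv_dedupe_aux l PySem.Set.empty [] h (by simp [PySem.Set.empty])]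
  simp

-- ===== VERDICT (by name: the statement is the Claim_ definition above) =====
theorem recommended_actions_py_spec : Claim_equal_recommended_actions_py := by
  intro signals retry_after _
  unfold Spec_recommended_actions_py recommended_actions_py recommended_actions_py_alt
  simp only [pvRuleActions, PySem.List.enumerate_cons, PySem.List.enumerate_nil,
    List.foldl_cons, List.foldl_nil]
  rw [pv_dedupe_of_nodup]
  · simp only [pv_ite_append]
    simp only [List.nil_append, List.append_assoc]
    exact congrArg₂ (· ++ ·) (pv_block_eq (pv_c0 signals retry_after) _)
      (congrArg₂ (· ++ ·) (pv_block_eq (pv_c1 signals retry_after) _)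
        (congrArg₂ (· ++ ·) (pv_block_eq (pv_c2 signals retry_after) _)
          (congrArg₂ (· ++ ·) (pv_block_eq (pv_c3 signals retry_after) _)
            (congrArg₂ (· ++ ·) (pv_block_eq (pv_c4 signals retry_after) _) rfl))))
  · -- duplicate-freeness of A's action list: case over the five guards, each branch is a literal list
    split_ifs <;> decide
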